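-- pv_equiv track=rewrite | github.com/kristiyankisimov/HackBulgaria-Programming101 | week0/magic-string/solution.py | magic_string
-- ===== SOURCE A (Python) =====
-- def magic_string(string):
--     steps = 0
--     middle = len(string) // 2
--     for i in range(len(string)):
--         if i < middle and string[i] == "<":
--             steps += 1
--         if i >= middle and string[i] == ">":
--             steps += 1
--     return steps
-- ===== SOURCE B (Python) =====
-- def magic_string(string):
--     steps = 0
--     i, j = 0, len(string) - 1
--     while i < j:
--         if string[i] == "<":
--             steps += 1
--         if string[j] == ">":
--             steps += 1
--         i += 1
--         j -= 1
--     if i == j and string[i] == ">":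
--         steps += 1
--     return steps
-- ===== Notes on version B (the rewrite author's own statement) =====
-- stated objective: alternative
-- what changed: Replaces A's full-length index loop with per-iteration midpoint comparisons by a two-pointer scan converging from both ends (each pointer position can only score one way, no midpoint is computed), with a meeting-point check for the middle character of odd-length strings.
import Mathlib
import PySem

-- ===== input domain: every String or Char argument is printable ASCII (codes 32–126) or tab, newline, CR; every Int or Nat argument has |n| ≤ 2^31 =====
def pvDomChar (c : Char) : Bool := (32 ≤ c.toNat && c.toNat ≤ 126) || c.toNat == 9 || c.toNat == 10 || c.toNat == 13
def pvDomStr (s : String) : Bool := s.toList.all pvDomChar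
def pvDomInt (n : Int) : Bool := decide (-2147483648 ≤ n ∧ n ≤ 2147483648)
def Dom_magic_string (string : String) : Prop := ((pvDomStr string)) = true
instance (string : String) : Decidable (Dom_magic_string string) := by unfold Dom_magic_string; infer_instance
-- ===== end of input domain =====

-- B replaces A's full-length index loop with midpoint comparisons by a two-pointer
-- scan converging from both ends, never computing a midpoint; objective: alternative.

-- ===== PORT A =====
def magic_string (string : String) : Int :=
  let s := string.toList
  let middle : Int := PySem.Int.floordiv (PySem.List.len s) 2
  (PySem.List.pyRange 0 (PySem.List.len s)).foldl
    (fun steps i =>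
      let steps := if i < middle ∧ PySem.List.pyGetD s i ' ' = '<' then steps + 1 else steps
      if middle ≤ i ∧ PySem.List.pyGetD s i ' ' = '>' then steps + 1 else steps)
    0

-- ===== PORT B =====
-- Source B's while loop: two pointers i, j converging from both ends; the post-loop
-- middle check (i == j) is the base case of the recursion that transliterates it.
def msLoop (s : List Char) (steps i j : Int) : Int :=
  if i < j then
    let steps1 := if PySem.List.pyGetD s i ' ' = '<' then steps + 1 else steps
    let steps2 := if PySem.List.pyGetD s j ' ' = '>' then steps1 + 1 else steps1
    msLoop s steps2 (i + 1) (j - 1)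
  else if i = j ∧ PySem.List.pyGetD s i ' ' = '>' then steps + 1 else steps
  termination_by (j - i + 1).toNat
  decreasing_by omega

def magic_string_alt (string : String) : Int :=
  let s := string.toList
  msLoop s 0 0 (PySem.List.len s - 1)

-- ===== PRECONDITION & SPEC =====
def Spec_magic_string (string : String) (out : Int) : Prop := out = magic_string_alt string
instance (string : String) (out : Int) : Decidable (Spec_magic_string string out) := by unfold Spec_magic_string; infer_instance

-- ===== CLAIM (what is proved, stated in full; the proofs are below) =====
def Claim_equal_magic_string : Prop := ∀ (string : String), Dom_magic_string string → Spec_magic_string string (magic_string string)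

-- ===== LEMMAS AND PROOFS =====

-- loop invariant: with i = a and j = n-1-a, the remaining iterations add the
-- '<'-count of first-half indices ≥ a and the '>'-count of second-half indices ≤ n-1-a.
theorem msLoop_count (s : List Char) (b : Nat) :
    ∀ (a : Nat) (steps : Int), b = s.length / 2 - a → a ≤ s.length / 2 →
      msLoop s steps (a : Int) ((s.length : Int) - 1 - a)
        = steps + (((s.take (s.length / 2)).drop a).countP (fun x => decide (x = '<')) : Int)
          + (((s.drop (s.length / 2)).take (s.length - s.length / 2 - a)).countP
              (fun x => decide (x = '>')) : Int) := by
  induction b with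
  | zero =>
    intro a steps hb ha
    have haeq : a = s.length / 2 := by omega
    rw [msLoop, if_neg (by omega)]
    have hd1 : (s.take (s.length / 2)).drop a = [] :=
      List.drop_eq_nil_of_le (by simp [haeq])
    by_cases hodd : s.length % 2 = 1
    · -- pointers meet on the middle character
      have hn1 : a < s.length := by omega
      have hij : (a : Int) = (s.length : Int) - 1 - a := by omega
      have hget : PySem.List.pyGetD s (a : Int) ' ' = s[a] := by
        rw [PySem.List.pyGetD_eq_getElem s ' ' (by positivity) (by simp; omega)]
        simp
      have hk1 : s.length - s.length / 2 - a = 1 := by omega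
      have hd2 : (s.drop (s.length / 2)).take (s.length - s.length / 2 - a) = [s[a]] := by
        rw [hk1, show (1 : Nat) = 0 + 1 from rfl, List.take_add_one]
        simp [List.getElem?_drop, haeq]
      rw [hd1, hd2]
      by_cases hc : s[a] = '>'
      · rw [if_pos ⟨hij, by rw [hget]; exact hc⟩]
        simp [hc]
      · rw [if_neg (by rintro ⟨-, h⟩; exact hc (hget ▸ h))]
        simp [hc]
    · -- even length: pointers crossed, nothing left
      have hk0 : s.length - s.length / 2 - a = 0 := by omega
      rw [if_neg (by rintro ⟨h, -⟩; omega)]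
      rw [hd1, hk0]
      simp
  | succ b ih =>
    intro a steps hb ha
    have ha' : a < s.length / 2 := by omega
    have han : a < s.length := by omega
    have hjn : s.length - 1 - a < s.length := by omega
    rw [msLoop, if_pos (by omega)]
    have hgi : PySem.List.pyGetD s (a : Int) ' ' = s[a] := by
      rw [PySem.List.pyGetD_eq_getElem s ' ' (by positivity) (by simp; omega)]
      simp
    have hjcast : (s.length : Int) - 1 - a = ((s.length - 1 - a : Nat) : Int) := by
      omega
    have hgj : PySem.List.pyGetD s ((s.length : Int) - 1 - a) ' ' = s[s.length - 1 - a] := by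
      rw [hjcast, PySem.List.pyGetD_eq_getElem s ' ' (by positivity) (by simp; omega)]
      simp
    -- peel the head of the first-half remainder and the tail of the second-half remainder
    have hlt : a < (s.take (s.length / 2)).length := by simp; omega
    have hd1 : (s.take (s.length / 2)).drop a
        = s[a] :: (s.take (s.length / 2)).drop (a + 1) := by
      rw [List.drop_eq_getElem_cons hlt]
      simp [List.getElem_take]
    have hk : s.length - s.length / 2 - a = (s.length - s.length / 2 - (a + 1)) + 1 := by
      omega
    have hidx : s.length / 2 + (s.length - s.length / 2 - (a + 1)) = s.length - 1 - a := by
      omega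
    have hd2 : (s.drop (s.length / 2)).take (s.length - s.length / 2 - a)
        = (s.drop (s.length / 2)).take (s.length - s.length / 2 - (a + 1))
            ++ [s[s.length - 1 - a]] := by
      rw [hk, List.take_add_one]
      simp [List.getElem?_drop, hidx, List.getElem?_eq_getElem hjn]
    have hrec := ih (a + 1)
      (if PySem.List.pyGetD s ((s.length : Int) - 1 - a) ' ' = '>'
        then (if PySem.List.pyGetD s (a : Int) ' ' = '<' then steps + 1 else steps) + 1
        else (if PySem.List.pyGetD s (a : Int) ' ' = '<' then steps + 1 else steps))
      (by omega) (by omega)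
    have hargs1 : ((a : Int)) + 1 = ((a + 1 : Nat) : Int) := by push_cast; ring
    have hargs2 : ((s.length : Int) - 1 - a) - 1 = (s.length : Int) - 1 - ((a + 1 : Nat) : Int) := by
      push_cast; ring
    rw [hargs1, hargs2, hrec, hd1, hd2]
    by_cases hc1 : s[a] = '<' <;> by_cases hc2 : s[s.length - 1 - a] = '>' <;>
      simp [hgi, hgj, hc1, hc2] <;> omega

-- str.count-free statement of A: the index loop equals the two half-counts.
theorem magic_string_eq (string : String) :
    magic_string string = magic_string_alt string := by
  unfold magic_string magic_string_alt
  set s := string.toList with hs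
  have hlen : PySem.List.len s = (s.length : Int) := rfl
  set n := s.length with hn
  set m := n / 2 with hm
  have hmn : m ≤ n := Nat.div_le_self n 2
  have hminm : min m s.length = m := by rw [← hn]; exact Nat.min_eq_left hmn
  have hmid : PySem.Int.floordiv ((n : Int)) 2 = (m : Int) := by
    exact_mod_cast PySem.Int.floordiv_natCast n 2
  simp only [hlen, hmid]
  rw [PySem.List.pyRange_one_append 0 (m : Int) (n : Int)
      (Int.natCast_nonneg m) (by exact_mod_cast hmn), List.foldl_append]
  -- first half: the '>' conditional never fires, and indices stay inside take m
  have h1 : ∀ (acc : Int), ∀ i ∈ PySem.List.pyRange 0 (m : Int),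
      (if (m : Int) ≤ i ∧ PySem.List.pyGetD s i ' ' = '>' then
         (if i < (m : Int) ∧ PySem.List.pyGetD s i ' ' = '<' then acc + 1 else acc) + 1
       else if i < (m : Int) ∧ PySem.List.pyGetD s i ' ' = '<' then acc + 1 else acc)
      = (fun acc2 (x : Char) => if x = '<' then acc2 + 1 else acc2) acc
          (PySem.List.pyGetD (s.take m) i ' ') := by
    intro acc i hi
    rw [PySem.List.mem_pyRange_one] at hi
    have him : i < (m : Int) := hi.2
    have hin : i < (n : Int) := lt_of_lt_of_le him (by exact_mod_cast hmn)
    have hget : PySem.List.pyGetD s i ' ' = PySem.List.pyGetD (s.take m) i ' ' := by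
      rw [PySem.List.pyGetD_eq_getElem s ' ' hi.1 (by exact_mod_cast hin),
          PySem.List.pyGetD_eq_getElem (s.take m) ' ' hi.1
            (by rw [List.length_take, hminm]; exact_mod_cast him)]
      simp [List.getElem_take]
    simp only [hget, him, true_and, not_le.mpr him, false_and, if_false]
  rw [PySem.List.foldl_congr_mem _ _ _ _ h1]
  have hlt : PySem.List.len (s.take m) = (m : Int) := by
    simp [PySem.List.len, List.length_take, hminm]
  have hfirst : (PySem.List.pyRange 0 (m : Int)).foldl
      (fun acc j => (fun acc2 (x : Char) => if x = '<' then acc2 + 1 else acc2) acc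
        (PySem.List.pyGetD (s.take m) j ' ')) (0 : Int)
      = (s.take m).foldl (fun acc2 x => if x = '<' then acc2 + 1 else acc2) 0 := by
    rw [show ((m : Int)) = PySem.List.len (s.take m) from hlt.symm]
    exact PySem.List.foldl_pyRange_zero_pyGetD (s.take m) ' ' (fun (acc2 : Int) (x : Char) => if x = '<' then acc2 + 1 else acc2) 0
  rw [hfirst]
  -- second half: the '<' conditional never fires
  have h2 : ∀ (acc : Int), ∀ i ∈ PySem.List.pyRange (m : Int) (n : Int),
      (if (m : Int) ≤ i ∧ PySem.List.pyGetD s i ' ' = '>' then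
         (if i < (m : Int) ∧ PySem.List.pyGetD s i ' ' = '<' then acc + 1 else acc) + 1
       else if i < (m : Int) ∧ PySem.List.pyGetD s i ' ' = '<' then acc + 1 else acc)
      = (fun acc2 (x : Char) => if x = '>' then acc2 + 1 else acc2) acc
          (PySem.List.pyGetD s i ' ') := by
    intro acc i hi
    rw [PySem.List.mem_pyRange_one] at hi
    simp only [not_lt.mpr hi.1, false_and, if_false, hi.1, true_and]
  rw [PySem.List.foldl_congr_mem _ _ _ _ h2]
  have hsecond : ∀ init : Int, (PySem.List.pyRange (m : Int) (n : Int)).foldl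
      (fun acc j => (fun acc2 (x : Char) => if x = '>' then acc2 + 1 else acc2) acc
        (PySem.List.pyGetD s j ' ')) init
      = (s.drop ((m : Int)).toNat).foldl (fun acc2 x => if x = '>' then acc2 + 1 else acc2) init := by
    intro init
    rw [show ((n : Int)) = PySem.List.len s from rfl]
    exact PySem.List.foldl_pyRange_pyGetD s ' ' (fun (acc2 : Int) (x : Char) => if x = '>' then acc2 + 1 else acc2) init (Int.natCast_nonneg m)
  rw [hsecond, Int.toNat_natCast]
  rw [PySem.List.foldl_ite_add_one (fun x => x = '<') (s.take m) 0,
      PySem.List.foldl_ite_add_one (fun x => x = '>') (s.drop m)]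
  show _ = msLoop s 0 0 ((s.length : Int) - 1)
  have hkey := msLoop_count s (s.length / 2) 0 0 (by omega) (by omega)
  simp only [Nat.cast_zero, List.drop_zero, Nat.sub_zero, sub_zero] at hkey
  rw [show s.length - s.length / 2 = (s.drop (s.length / 2)).length by simp,
    List.take_length] at hkey
  rw [hkey]

-- ===== VERDICT (by name: the statement is the Claim_ definition above) =====
theorem magic_string_spec : Claim_equal_magic_string := by
  intro string _
  exact magic_string_eq string
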